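-- pv_equiv track=rewrite | github.com/keithchev/activity-dashboard | analysis/googlething_level2.py | answer_
-- ===== SOURCE A (Python) =====
-- import math
--
-- def answer_(pegs):
--
--
--     N = len(pegs)
--
--     nIsOdd = math.fmod(N,2)
--
--     pegSum = 0
--
--     for i in range(N-1):
--
--         # N even, i even: +1; N even, i odd: -1
--         # N odd, i even: -1; N odd, i odd: +1
--
--         sign = nIsOdd == math.fmod(i,2)
--
--         if not sign: sign = -1
--
--         pegSum += sign*(pegs[i+1] - pegs[i])
--
--
--     sign = 1
--     if (math.fmod(N,2)): sign = -1
--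
--     # this is the radius of the last cog
--     radius_n = sign*pegSum
--
--     # solution exists (ignoring physical constraints)
--     if (radius_n > 0):
--
--         # and this the radius of the first
--         radius_1 = 2*radius_n
--
--         # if the first cog can fit
--         if ( (radius_1 < (pegs[2]-pegs[1])) and (radius_n < (pegs[-1]-pegs[-2])) ):
--
--             return [radius_1, 1]
--
--
--     return [-1,-1]
--
--
--
--
--     def answer(pegs):
--
--         N = len(pegs)
--
--         cog_1 = range(1, peg[2]-peg[1]-1)
-- ===== SOURCE B (Python) =====
-- def answer_(pegs):
--     # Simulate the meshed gear chain from the right: adjacent gear radii satisfy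
--     # r_i + r_{i+1} = gap_i, so propagating r := gap - r over the gaps from the
--     # last one backwards yields the last gear's radius with no sign/parity logic.
--     gaps = [q - p for p, q in zip(pegs, pegs[1:])]
--     r = 0
--     for g in reversed(gaps):
--         r = g - r
--     if r > 0:
--         r1 = 2 * r
--         if r1 < pegs[2] - pegs[1] and r < pegs[-1] - pegs[-2]:
--             return [r1, 1]
--     return [-1, -1]
-- ===== Notes on version B (the rewrite author's own statement) =====
-- stated objective: simpler
-- what changed: B replaces A's fmod/parity alternating-sum of differences by a physical simulation of the gear chain: it builds the gap list and folds r := gap - r over it from the right (adjacent radii sum to the gap), with no sign or parity computation; the final guard is unchanged.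
import Mathlib
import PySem

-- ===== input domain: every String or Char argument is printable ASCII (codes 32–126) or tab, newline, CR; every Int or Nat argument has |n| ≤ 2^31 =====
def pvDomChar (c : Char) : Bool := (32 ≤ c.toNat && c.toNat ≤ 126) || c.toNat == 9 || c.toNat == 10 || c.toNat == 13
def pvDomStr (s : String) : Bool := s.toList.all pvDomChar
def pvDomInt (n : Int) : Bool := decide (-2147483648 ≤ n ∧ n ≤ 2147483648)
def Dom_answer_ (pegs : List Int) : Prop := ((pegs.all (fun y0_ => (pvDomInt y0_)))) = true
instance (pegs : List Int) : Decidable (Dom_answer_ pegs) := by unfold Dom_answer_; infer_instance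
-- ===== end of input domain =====

-- B replaces A's fmod/parity alternating sum of differences by a gear-chain
-- simulation: fold r := gap - r over the gap list from the right.  Objective: simpler.

-- ===== PORT A =====
-- pegSum loop of A.  Indices i and i+1 are always in range for i ∈ range(N-1),
-- so pyGetD with default 0 is exact here.
def aPegSum (pegs : List Int) : Int :=
  -- nIsOdd = math.fmod(N,2) on the nonnegative int N = len(pegs)
  (PySem.List.pyRange 0 ((pegs.length : Int) - 1) 1).foldl
    (fun pegSum i =>
      pegSum + (if (pegs.length : Int) % 2 = i % 2 then (1 : Int) else -1) *
        (PySem.List.pyGetD pegs (i + 1) 0 - PySem.List.pyGetD pegs i 0)) 0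

-- pegs[2], pegs[1], pegs[-1], pegs[-2] are in range whenever this branch is
-- reached inside Pre_answer_ (radius_n > 0 forces length ≥ 3 under Pre_), so
-- pyGetD with default 0 is exact on Pre_; on the excluded inputs Python raises.
def answer_ (pegs : List Int) : List Int :=
  let N : Int := (pegs.length : Int)
  let sign : Int := if N % 2 ≠ 0 then -1 else 1
  let radius_n : Int := sign * aPegSum pegs
  if radius_n > 0 then
    let radius_1 : Int := 2 * radius_n
    if radius_1 < PySem.List.pyGetD pegs 2 0 - PySem.List.pyGetD pegs 1 0 ∧
       radius_n < PySem.List.pyGetD pegs (-1) 0 - PySem.List.pyGetD pegs (-2) 0 then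
      [radius_1, 1]
    else [-1, -1]
  else [-1, -1]

-- ===== PORT B =====
-- gaps = [q - p for p, q in zip(pegs, pegs[1:])]
def bGaps (pegs : List Int) : List Int :=
  (pegs.zip (pegs.drop 1)).map (fun p => p.2 - p.1)

-- r = 0; for g in reversed(gaps): r = g - r
def bRadius (pegs : List Int) : Int :=
  (bGaps pegs).reverse.foldl (fun r g => g - r) 0

def answer__alt (pegs : List Int) : List Int :=
  let r : Int := bRadius pegs
  if r > 0 then
    let r1 : Int := 2 * r
    if r1 < PySem.List.pyGetD pegs 2 0 - PySem.List.pyGetD pegs 1 0 ∧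
       r < PySem.List.pyGetD pegs (-1) 0 - PySem.List.pyGetD pegs (-2) 0 then
      [r1, 1]
    else [-1, -1]
  else [-1, -1]

-- ===== PRECONDITION & SPEC =====
-- Pre_ excludes exactly the inputs on which A raises IndexError: a 2-element list
-- with pegs[1] > pegs[0], where the guard evaluates pegs[2] (B raises there too).
def Pre_answer_ (pegs : List Int) : Prop :=
  ¬ (pegs.length = 2 ∧ pegs.getD 0 0 < pegs.getD 1 0)
instance (pegs : List Int) : Decidable (Pre_answer_ pegs) := by unfold Pre_answer_; infer_instance
def pvWitness_answer_ : List Int := [4, 30, 50]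

def Spec_answer_ (pegs : List Int) (out : List Int) : Prop := out = answer__alt pegs
instance (pegs : List Int) (out : List Int) : Decidable (Spec_answer_ pegs out) := by unfold Spec_answer_; infer_instance

-- ===== CLAIM =====
def Claim_equal_answer_ : Prop := ∀ (pegs : List Int), Dom_answer_ pegs → Pre_answer_ pegs → Spec_answer_ pegs (answer_ pegs)

-- ===== LEMMAS AND PROOFS =====

-- the alternating-coefficient sum over a list IS the right-to-left r := g - r fold
theorem altsum_eq_foldr (ds : List Int) :
    ((List.range ds.length).map
        (fun k => (if k % 2 = 0 then (1 : Int) else -1) * ds.getD k 0)).sum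
      = ds.foldr (fun g r => g - r) 0 := by
  induction ds with
  | nil => simp
  | cons d tl ih =>
    rw [List.length_cons, List.range_succ_eq_map, List.map_cons, List.map_map,
      List.sum_cons]
    have hmap : ((List.range tl.length).map
          ((fun k => (if k % 2 = 0 then (1 : Int) else -1) * (d :: tl).getD k 0) ∘ Nat.succ))
        = (List.range tl.length).map
          (fun k => (-1 : Int) * ((if k % 2 = 0 then (1 : Int) else -1) * tl.getD k 0)) := by
      apply List.map_congr_left
      intro k _
      simp only [Function.comp, List.getD_cons_succ]
      by_cases hk : k % 2 = 0
      · have h1 : ¬ ((k + 1) % 2 = 0) := by omega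
        simp [hk, h1, Nat.succ_eq_add_one]
      · have h1 : (k + 1) % 2 = 0 := by omega
        simp [hk, h1, Nat.succ_eq_add_one]
    rw [hmap, PySem.List.sum_map_const_mul_int, ih]
    simp [List.foldr_cons]
    ring

-- the gap list: length and entries
theorem bGaps_length (pegs : List Int) :
    (bGaps pegs).length = ((pegs.length : Int) - 1).toNat := by
  simp [bGaps]

theorem bGaps_getD (pegs : List Int) (k : Nat) (hk : k < (bGaps pegs).length) :
    (bGaps pegs).getD k 0 = pegs.getD (k + 1) 0 - pegs.getD k 0 := by
  have hlen := bGaps_length pegs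
  have hk1 : k + 1 < pegs.length := by omega
  have hk0 : k < pegs.length := by omega
  rw [List.getD_eq_getElem _ _ hk, List.getD_eq_getElem _ _ hk1, List.getD_eq_getElem _ _ hk0]
  simp [bGaps, List.getElem_zip]

-- A's signed pegSum equals B's gear-chain fold
theorem radius_eq (pegs : List Int) :
    (if ((pegs.length : Int)) % 2 ≠ 0 then (-1 : Int) else 1) * aPegSum pegs
      = bRadius pegs := by
  unfold aPegSum
  rw [PySem.List.foldl_add, zero_add, ← PySem.List.sum_map_const_mul_int]
  -- rewrite the range as List.range and normalise each term
  rw [PySem.List.pyRange_one, List.map_map]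
  have hM : (((pegs.length : Int) - 1) - 0).toNat = (bGaps pegs).length := by
    rw [bGaps_length]; omega
  have hmap : ((List.range (((pegs.length : Int) - 1) - 0).toNat).map
        ((fun i => (if (pegs.length : Int) % 2 ≠ 0 then (-1 : Int) else 1) *
          ((if (pegs.length : Int) % 2 = i % 2 then (1 : Int) else -1) *
            (PySem.List.pyGetD pegs (i + 1) 0 - PySem.List.pyGetD pegs i 0))) ∘
          (fun k : Nat => (0 : Int) + k)))
      = (List.range (bGaps pegs).length).map
          (fun k => (if k % 2 = 0 then (1 : Int) else -1) * (bGaps pegs).getD k 0) := by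
    rw [hM]
    apply List.map_congr_left
    intro k hk
    rw [List.mem_range] at hk
    simp only [Function.comp, zero_add]
    have hget : PySem.List.pyGetD pegs ((k : Int) + 1) 0 - PySem.List.pyGetD pegs (k : Int) 0
        = (bGaps pegs).getD k 0 := by
      have h1 : ((k : Int) + 1) = ((k + 1 : Nat) : Int) := by push_cast; ring
      rw [h1, PySem.List.pyGetD_natCast, PySem.List.pyGetD_natCast, bGaps_getD pegs k hk]
    rw [hget]
    -- coefficient: sign * (parity match) = (-1)^k
    have hNk : ((pegs.length : Int)) % 2 = 0 ∨ ((pegs.length : Int)) % 2 = 1 :=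
      Int.emod_two_eq _
    by_cases hk2 : k % 2 = 0
    · have hki : (k : Int) % 2 = 0 := by omega
      rcases hNk with h | h <;> simp [h, hki, hk2]
    · have hki : (k : Int) % 2 = 1 := by omega
      have hk21 : k % 2 = 1 := by omega
      rcases hNk with h | h <;> simp [h, hki, hk21]
  rw [hmap, altsum_eq_foldr]
  unfold bRadius
  rw [List.foldl_reverse]

theorem answer__main (pegs : List Int) : answer_ pegs = answer__alt pegs := by
  simp only [answer_, answer__alt, radius_eq]

-- ===== VERDICT (by name: the statement is the Claim_ definition above) =====
theorem answer__spec : Claim_equal_answer_ := by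
  intro pegs _ _
  exact answer__main pegs
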